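-- pv_equiv track=rewrite | github.com/vishwassharma98499/Leetcode | Python/mediumProblem.py | count_subarrays_with_average
-- ===== SOURCE A (Python) =====
-- from collections import defaultdict
--
-- def count_subarrays_with_average(arr, k):
--     n = len(arr)
--     prefix_sum = 0
--     count = 0
--     sum_frequency = defaultdict(int)
--
--     for i in range(n):
--         # Subtract k from each element and calculate prefix sum
--         prefix_sum += arr[i] - k
--
--         # If prefix sum is 0, we've found a subarray with average k
--         if prefix_sum == 0:
--             count += 1
--
--         # Add frequency of this prefix sum (if it exists)
--         count += sum_frequency[prefix_sum]
--
--         # Increment frequency of this prefix sum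
--         sum_frequency[prefix_sum] += 1
--
--     return count
-- ===== SOURCE B (Python) =====
-- def count_subarrays_with_average(arr, k):
--     # Build the prefix list P with P[0]=0, P[i+1]=P[i]+(arr[i]-k),
--     # then count pairs of equal entries by scanning each head against its tail.
--     P = [0]
--     ps = 0
--     for x in arr:
--         ps += x - k
--         P.append(ps)
--     count = 0
--     rest = P
--     while rest:
--         head, rest = rest[0], rest[1:]
--         count += rest.count(head)
--     return count
-- ===== Notes on version B (the rewrite author's own statement) =====
-- stated objective: alternative
-- what changed: Replaces the one-pass frequency-dictionary counting with an explicit prefix list followed by a head-vs-tail pair count by list recursion (no dict).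
import Mathlib
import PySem

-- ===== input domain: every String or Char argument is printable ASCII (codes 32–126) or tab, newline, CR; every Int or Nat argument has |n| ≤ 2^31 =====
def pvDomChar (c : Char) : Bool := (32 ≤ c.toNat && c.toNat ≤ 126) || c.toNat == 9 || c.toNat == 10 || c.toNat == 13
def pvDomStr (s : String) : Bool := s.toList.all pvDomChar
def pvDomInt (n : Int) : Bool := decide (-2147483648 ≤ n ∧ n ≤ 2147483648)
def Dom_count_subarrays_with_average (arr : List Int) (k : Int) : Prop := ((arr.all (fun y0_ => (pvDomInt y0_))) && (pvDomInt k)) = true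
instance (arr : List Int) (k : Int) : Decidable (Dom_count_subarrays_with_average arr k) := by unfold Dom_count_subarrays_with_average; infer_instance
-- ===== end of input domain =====

-- B replaces A's one-pass frequency-dict counting with an explicit prefix list and a
-- head-vs-tail pair count by list recursion (alternative decomposition, not faster).


-- ===== PORT A =====
-- state: (prefix_sum, count, sum_frequency); defaultdict read+increment ported as
-- insert of (getD + 1), which is value-wise exact
def count_subarrays_with_average (arr : List Int) (k : Int) : Int :=
  (arr.foldl (fun (st : Int × Int × PySem.Dict Int Int) a =>
      let ps := st.1 + (a - k)
      let c1 := st.2.1 + (if ps = 0 then 1 else 0)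
      let c2 := c1 + st.2.2.getD ps 0
      (ps, c2, st.2.2.insert ps (st.2.2.getD ps 0 + 1))) (0, 0, PySem.Dict.empty)).2.1

-- ===== PORT B =====
-- 'while rest: head, rest = rest[0], rest[1:]; count += rest.count(head)'
def pvPairCount : List Int → Int
  | [] => 0
  | head :: rest => (rest.count head : Int) + pvPairCount rest

-- the loop building P: state (P, ps)
def count_subarrays_with_average_alt (arr : List Int) (k : Int) : Int :=
  pvPairCount
    ((arr.foldl (fun (st : List Int × Int) x =>
        let ps := st.2 + (x - k)
        (st.1 ++ [ps], ps)) ([0], 0)).1)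

-- ===== PRECONDITION & SPEC =====
def Spec_count_subarrays_with_average (arr : List Int) (k : Int) (out : Int) : Prop := out = count_subarrays_with_average_alt arr k
instance (arr : List Int) (k : Int) (out : Int) : Decidable (Spec_count_subarrays_with_average arr k out) := by unfold Spec_count_subarrays_with_average; infer_instance

-- ===== CLAIM (what is proved, stated in full; the proofs are below) =====
def Claim_equal_count_subarrays_with_average : Prop := ∀ (arr : List Int) (k : Int), Dom_count_subarrays_with_average arr k → Spec_count_subarrays_with_average arr k (count_subarrays_with_average arr k)

-- ===== LEMMAS AND PROOFS =====

-- the prefix values produced after an initial running sum ps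
def pvTailPref (k : Int) : Int → List Int → List Int
  | _, [] => []
  | ps, a :: l => (ps + (a - k)) :: pvTailPref k (ps + (a - k)) l

-- matches of each new prefix value against the history H (the quantity A's loop adds)
def pvNewC (k : Int) : List Int → Int → List Int → Int
  | _, _, [] => 0
  | H, ps, a :: l =>
      let ps' := ps + (a - k)
      (H.count ps' : Int) + pvNewC k (H ++ [ps']) ps' l

theorem pvBuild_eq (k : Int) (l : List Int) : ∀ (acc : List Int) (ps : Int),
    (l.foldl (fun (st : List Int × Int) x =>
        let ps := st.2 + (x - k)
        (st.1 ++ [ps], ps)) (acc, ps)).1 = acc ++ pvTailPref k ps l := by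
  induction l with
  | nil => intro acc ps; simp [pvTailPref]
  | cons a l ih =>
      intro acc ps
      simp only [List.foldl_cons, pvTailPref]
      rw [ih]
      simp

theorem pvPairCount_concat (x : Int) : ∀ (H : List Int),
    pvPairCount (H ++ [x]) = pvPairCount H + (H.count x : Int) := by
  intro H
  induction H with
  | nil => simp [pvPairCount]
  | cons h H ih =>
      simp only [List.cons_append, pvPairCount, ih, List.count_append, List.count_cons,
        List.count_nil]
      by_cases hx : x = h
      · subst hx; simp; ring
      · have h1 : (x == h) = false := by simp [hx]
        have h2 : (h == x) = false := by simp [Ne.symm hx]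
        simp [h1, h2]; ring

theorem pvPairCount_split (k : Int) (l : List Int) : ∀ (H : List Int) (ps : Int),
    pvPairCount (H ++ pvTailPref k ps l) = pvPairCount H + pvNewC k H ps l := by
  induction l with
  | nil => intro H ps; simp [pvTailPref, pvNewC]
  | cons a l ih =>
      intro H ps
      simp only [pvTailPref, pvNewC]
      have : H ++ (ps + (a - k)) :: pvTailPref k (ps + (a - k)) l
           = (H ++ [ps + (a - k)]) ++ pvTailPref k (ps + (a - k)) l := by simp
      rw [this, ih, pvPairCount_concat]
      ring

theorem pvFoldA_eq (k : Int) (l : List Int) : ∀ (T : List Int) (ps c : Int)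
    (d : PySem.Dict Int Int), (∀ v, d.getD v 0 = (T.count v : Int)) →
    (l.foldl (fun (st : Int × Int × PySem.Dict Int Int) a =>
      let ps := st.1 + (a - k)
      let c1 := st.2.1 + (if ps = 0 then 1 else 0)
      let c2 := c1 + st.2.2.getD ps 0
      (ps, c2, st.2.2.insert ps (st.2.2.getD ps 0 + 1))) (ps, c, d)).2.1
    = c + pvNewC k (0 :: T) ps l := by
  induction l with
  | nil => intro T ps c d _; simp [pvNewC]
  | cons a l ih =>
      intro T ps c d hd
      simp only [List.foldl_cons, pvNewC]
      rw [ih (T ++ [ps + (a - k)]) _ _ _ ?_]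
      · rw [hd]
        have hcnt : (((0 : Int) :: T).count (ps + (a - k)) : Int)
            = (if ps + (a - k) = 0 then 1 else 0) + (T.count (ps + (a - k)) : Int) := by
          rw [List.count_cons]
          by_cases h0 : ps + (a - k) = 0
          · simp [h0]; omega
          · have : ((0 : Int) == ps + (a - k)) = false := by
              simp [Ne.symm h0]
            simp [this, h0]
        rw [hcnt]
        simp only [List.cons_append]
        ring
      · intro v
        rw [PySem.Dict.getD_insert, hd, List.count_append, List.count_cons]
        by_cases hv : v = ps + (a - k)
        · subst hv; simp
        · have : (ps + (a - k) == v) = false := by simp [Ne.symm hv]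
          simp [hv, this, hd]

-- ===== VERDICT (by name: the statement is the Claim_ definition above) =====
theorem count_subarrays_with_average_spec : Claim_equal_count_subarrays_with_average := by
  intro arr k _
  show _ = _
  unfold count_subarrays_with_average count_subarrays_with_average_alt
  rw [pvBuild_eq, pvPairCount_split,
     pvFoldA_eq k arr [] 0 0 PySem.Dict.empty (by intro v; simp [PySem.Dict.getD])]
  simp [pvPairCount]
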